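-- pv_equiv track=rewrite | github.com/lzpel/FashionR2R | pick_flatten_subset_copy.py | compute_quota_per_dir
-- ===== SOURCE A (Python) =====
-- def compute_quota_per_dir(counts: dict[str, int], total: int) -> dict[str, int]:
--     cats = list(counts.keys())
--     D = len(cats)
--     if D == 0:
--         return {}
--     base = max(total // D, 0)
--     q = {c: min(base, counts[c]) for c in cats}
--     allocated = sum(q.values())
--     rem = total - allocated
--     if rem <= 0:
--         return q
--     target = base + 1
--     while rem > 0:
--         progressed = False
--         for c in cats:
--             if q[c] < target and q[c] < counts[c]:
--                 q[c] += 1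
--                 rem -= 1
--                 progressed = True
--                 if rem == 0:
--                     break
--         if not progressed:
--             target += 1
--             if all(q[c] >= counts[c] for c in cats):
--                 break
--     return q
-- ===== SOURCE B (Python) =====
-- def compute_quota_per_dir(counts: dict[str, int], total: int) -> dict[str, int]:
--     D = len(counts)
--     if D == 0:
--         return {}
--     base = max(total // D, 0)
--
--     def S(L):
--         return sum(min(L, v) for v in counts.values())
--
--     if total <= S(base):
--         return {c: min(base, v) for c, v in counts.items()}
--     maxc = max(counts.values())
--     if S(maxc) <= total:
--         # demand exceeds what water-filling can ever allocate: everyone saturates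
--         return {c: min(maxc, v) for c, v in counts.items()}
--     # binary search the largest level L with S(L) <= total (invariant: S(lo) <= total < S(hi))
--     lo, hi = base, maxc
--     while hi - lo > 1:
--         mid = (lo + hi) // 2
--         if S(mid) <= total:
--             lo = mid
--         else:
--             hi = mid
--     r = total - S(lo)
--     out = {}
--     for c, v in counts.items():
--         if r > 0 and v > lo:
--             out[c] = min(lo, v) + 1
--             r -= 1
--         else:
--             out[c] = min(lo, v)
--     return out
-- ===== Notes on version B (the rewrite author's own statement) =====
-- stated objective: alternative
-- what changed: Replaces A's unit-by-unit round-robin water-filling loop (one dict pass per allocated unit/level) by a binary search for the fill level L with sum(min(L,v)) <= total, followed by a single pass giving min(L,v) plus one extra unit to the first categories with remaining capacity; Pre_ only requires distinct keys, which every real Python dict argument satisfies (an artifact of the assoc-list encoding).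
import Mathlib
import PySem

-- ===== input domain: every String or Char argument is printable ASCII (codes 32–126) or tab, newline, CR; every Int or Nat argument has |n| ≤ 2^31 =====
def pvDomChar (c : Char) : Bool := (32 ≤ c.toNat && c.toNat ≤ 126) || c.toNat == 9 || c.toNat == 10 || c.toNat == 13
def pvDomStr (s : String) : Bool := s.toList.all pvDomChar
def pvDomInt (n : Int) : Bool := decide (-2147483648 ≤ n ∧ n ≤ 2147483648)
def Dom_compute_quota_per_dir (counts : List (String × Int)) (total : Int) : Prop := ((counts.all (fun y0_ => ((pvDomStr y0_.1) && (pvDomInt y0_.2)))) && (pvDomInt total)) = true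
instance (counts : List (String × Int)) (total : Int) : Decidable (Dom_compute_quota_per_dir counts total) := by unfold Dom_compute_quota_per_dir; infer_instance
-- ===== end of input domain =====

-- B replaces A's unit-by-unit round-robin water-filling loop by a binary search for the
-- fill level plus one final assignment pass (objective: alternative algorithm, same result).

-- ===== PORT A =====
-- inner 'for c in cats' loop of A's while: bump eligible cats by one, break when rem hits 0;
-- returns (q, rem, progressed)
def pvInnerA (cnt : PySem.Dict String Int) : List String → PySem.Dict String Int → Int → Int → Bool → (PySem.Dict String Int × Int × Bool)
  | [], q, rem, _, prog => (q, rem, prog)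
  | c :: cs, q, rem, target, prog =>
    if q.getD c 0 < target ∧ q.getD c 0 < cnt.getD c 0 then
      let q' := q.insert c (q.getD c 0 + 1)
      let rem' := rem - 1
      if rem' = 0 then (q', rem', true)          -- 'if rem == 0: break'
      else pvInnerA cnt cs q' rem' target true
    else pvInnerA cnt cs q rem target prog

-- A's 'while rem > 0' loop; fuel only makes the recursion total (2*rem+2 steps always suffice)
def pvWhileA (cnt : PySem.Dict String Int) (cats : List String) : Nat → PySem.Dict String Int → Int → Int → PySem.Dict String Int
  | 0, q, _, _ => q
  | fuel+1, q, rem, target =>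
    if 0 < rem then
      match pvInnerA cnt cats q rem target false with
      | (q', rem', prog) =>
        if prog then pvWhileA cnt cats fuel q' rem' target
        else if cats.all (fun c => decide (cnt.getD c 0 ≤ q'.getD c 0)) then q'   -- 'if all(q[c] >= counts[c] ...): break'
        else pvWhileA cnt cats fuel q' rem' (target + 1)
    else q

def compute_quota_per_dir (counts : List (String × Int)) (total : Int) : List (String × Int) :=
  let cnt := PySem.Dict.mk counts
  let cats := cnt.keys
  let D : Int := (cats.length : Int)
  if D = 0 then []
  else
    let base := max (PySem.Int.floordiv total D) 0
    -- q = {c: min(base, counts[c]) for c in cats}; counts[c] cannot raise (c is a key)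
    let q := cats.foldl (fun q c => q.insert c (min base (cnt.getD c 0))) PySem.Dict.empty
    let allocated := q.values.sum
    let rem := total - allocated
    if rem ≤ 0 then q.items
    else (pvWhileA cnt cats (2 * rem.toNat + 2) q rem (base + 1)).items

-- ===== PORT B =====
-- S(L) = sum(min(L, v) for v in counts.values())
def pvSsum (counts : List (String × Int)) (L : Int) : Int :=
  counts.foldl (fun a p => a + min L p.2) 0

-- the final assignment loop of B ('for c, v in counts.items(): ...')
def pvFill : List (String × Int) → Int → Int → List (String × Int)
  | [], _, _ => []
  | p :: t, lo, r =>
    if 0 < r ∧ lo < p.2 then (p.1, min lo p.2 + 1) :: pvFill t lo (r - 1)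
    else (p.1, min lo p.2) :: pvFill t lo r

-- B's 'while hi - lo > 1' binary search; fuel (hi-lo).toNat only makes it total
def pvBsearch (counts : List (String × Int)) (total : Int) : Nat → Int → Int → Int
  | 0, lo, _ => lo
  | fuel+1, lo, hi =>
    if 1 < hi - lo then
      let mid := PySem.Int.floordiv (lo + hi) 2
      if pvSsum counts mid ≤ total then pvBsearch counts total fuel mid hi
      else pvBsearch counts total fuel lo mid
    else lo

def compute_quota_per_dir_alt (counts : List (String × Int)) (total : Int) : List (String × Int) :=
  let D : Int := (counts.length : Int)
  if D = 0 then []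
  else
    let base := max (PySem.Int.floordiv total D) 0
    if total ≤ pvSsum counts base then counts.map (fun p => (p.1, min base p.2))
    else
      -- max(counts.values()); the list is nonempty here, so max? is some (getD default unreachable)
      let maxc := (PySem.List.max? (counts.map Prod.snd) (fun v => v)).getD 0
      if pvSsum counts maxc ≤ total then counts.map (fun p => (p.1, min maxc p.2))
      else
        let lo := pvBsearch counts total (maxc - base).toNat base maxc
        pvFill counts lo (total - pvSsum counts lo)

-- ===== PRECONDITION & SPEC =====
-- Pre_ only requires the association-list keys to be distinct: a Python dict argument can
-- never contain duplicate keys, so this excludes no input the Python function accepts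
-- (it is an artifact of encoding dict[str,int] as List (String × Int)).
def Pre_compute_quota_per_dir (counts : List (String × Int)) (total : Int) : Prop :=
  (counts.map Prod.fst).Nodup
instance (counts : List (String × Int)) (total : Int) : Decidable (Pre_compute_quota_per_dir counts total) := by unfold Pre_compute_quota_per_dir; infer_instance

def pvWitness_compute_quota_per_dir : (List (String × Int)) × Int := ([("a", 3), ("b", 1), ("c", 7)], 6)

def Spec_compute_quota_per_dir (counts : List (String × Int)) (total : Int) (out : List (String × Int)) : Prop := out = compute_quota_per_dir_alt counts total
instance (counts : List (String × Int)) (total : Int) (out : List (String × Int)) : Decidable (Spec_compute_quota_per_dir counts total out) := by unfold Spec_compute_quota_per_dir; infer_instance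

-- ===== CLAIM (what is proved, stated in full; the proofs are below) =====
def Claim_equal_compute_quota_per_dir : Prop := ∀ (counts : List (String × Int)) (total : Int), Dom_compute_quota_per_dir counts total → Pre_compute_quota_per_dir counts total → Spec_compute_quota_per_dir counts total (compute_quota_per_dir counts total)

-- ===== LEMMAS AND PROOFS =====

-- number of categories that still have capacity above level L
def pvK (counts : List (String × Int)) (L : Int) : Int :=
  ((counts.countP (fun p => decide (L < p.2)) : Nat) : Int)

theorem pvSsum_eq (counts : List (String × Int)) (L : Int) :
    pvSsum counts L = (counts.map (fun p => min L p.2)).sum := by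
  simpa using PySem.List.foldl_add counts (fun p => min L p.2) 0

theorem pvSsum_mono (counts : List (String × Int)) {L M : Int} (h : L ≤ M) :
    pvSsum counts L ≤ pvSsum counts M := by
  rw [pvSsum_eq, pvSsum_eq]
  apply List.sum_le_sum
  intro p _
  exact min_le_min h le_rfl

theorem pvSsum_succ (counts : List (String × Int)) (L : Int) :
    pvSsum counts (L + 1) = pvSsum counts L + pvK counts L := by
  rw [pvSsum_eq, pvSsum_eq]
  unfold pvK
  induction counts with
  | nil => simp
  | cons p t ih =>
    simp only [List.map_cons, List.sum_cons, List.countP_cons]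
    by_cases h : L < p.2
    · simp only [h, decide_true]
      push_cast
      omega
    · simp only [h, decide_false]
      push_cast
      omega

theorem pvFill_zero (counts : List (String × Int)) (L : Int) {r : Int} (h : r ≤ 0) :
    pvFill counts L r = counts.map (fun p => (p.1, min L p.2)) := by
  induction counts generalizing r with
  | nil => rfl
  | cons p t ih => rw [pvFill]; rw [if_neg (by omega)]; rw [ih h]; rfl

theorem pvFill_full (counts : List (String × Int)) (L : Int) {r : Int} (h : pvK counts L ≤ r) :
    pvFill counts L r = counts.map (fun p => (p.1, min (L + 1) p.2)) := by
  induction counts generalizing r with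
  | nil => rfl
  | cons p t ih =>
    unfold pvK at h ih
    simp only [List.countP_cons] at h
    by_cases hp : L < p.2
    · simp only [hp, decide_true] at h
      push_cast at h
      rw [pvFill, if_pos ⟨by omega, hp⟩, ih (by omega)]
      simp only [List.map_cons]
      congr 2
      omega
    · simp only [hp, decide_false] at h
      push_cast at h
      rw [pvFill, if_neg (by tauto), ih (by omega)]
      simp only [List.map_cons]
      congr 2
      omega

theorem pvFill_noelig (counts : List (String × Int)) (L : Int) (r : Int)
    (h : ∀ p ∈ counts, p.2 ≤ L) :
    pvFill counts L r = counts.map (fun p => (p.1, min L p.2)) := by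
  induction counts generalizing r with
  | nil => rfl
  | cons p t ih =>
    rw [pvFill, if_neg (by have := h p (by simp); omega)]
    rw [ih _ (fun q hq => h q (by simp [hq]))]
    rfl

-- first-match lookup in a duplicate-free association list
theorem pvGetD_mk (counts : List (String × Int)) (hnd : (counts.map Prod.fst).Nodup)
    {c : String} {v : Int} (hm : (c, v) ∈ counts) :
    (PySem.Dict.mk counts).getD c 0 = v := by
  apply PySem.Dict.getD_of_mem_items (PySem.Dict.mk counts) hm
  simpa [PySem.Dict.keys] using hnd

-- iterating 'for c in cats' with a lookup equals iterating over the items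
theorem pvMapKeys {α : Type} (counts : List (String × Int)) (f : String → Int → α)
    (hnd : (counts.map Prod.fst).Nodup) :
    (counts.map Prod.fst).map (fun c => f c ((PySem.Dict.mk counts).getD c 0))
      = counts.map (fun p => f p.1 p.2) := by
  rw [List.map_map]
  apply List.map_congr_left
  intro p hp
  simp only [Function.comp_apply]
  rw [pvGetD_mk counts hnd (show (p.1, p.2) ∈ counts by simpa using hp)]


theorem pvBsearch_spec (counts : List (String × Int)) (total : Int) :
    ∀ (fuel : Nat) (lo hi : Int), pvSsum counts lo ≤ total → total < pvSsum counts hi →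
    lo < hi → (hi - lo).toNat ≤ fuel →
    pvSsum counts (pvBsearch counts total fuel lo hi) ≤ total ∧
      total < pvSsum counts (pvBsearch counts total fuel lo hi + 1) := by
  intro fuel
  induction fuel with
  | zero => intro lo hi _ _ hlt hf; omega
  | succ f ih =>
    intro lo hi hlo hhi hlt hf
    rw [pvBsearch]
    by_cases hgap : 1 < hi - lo
    · rw [if_pos hgap]
      have hmid1 : lo + 1 ≤ PySem.Int.floordiv (lo + hi) 2 := by
        rw [PySem.Int.le_floordiv_iff_mul_le (by norm_num)]; omega
      have hmid2 : PySem.Int.floordiv (lo + hi) 2 < hi := by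
        rw [PySem.Int.floordiv_lt_iff_lt_mul (by norm_num)]; omega
      by_cases hs : pvSsum counts (PySem.Int.floordiv (lo + hi) 2) ≤ total
      · simp only [hs, if_pos]
        exact ih _ _ hs hhi (by omega) (by omega)
      · rw [if_neg hs]
        exact ih _ _ hlo (by omega) (by omega) (by omega)
    · rw [if_neg hgap]
      have : hi = lo + 1 := by omega
      exact ⟨hlo, by rw [← this]; exact hhi⟩

theorem pvLevel_unique (counts : List (String × Int)) (total : Int) {L M : Int}
    (h1 : pvSsum counts L ≤ total) (h2 : total < pvSsum counts (L + 1))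
    (h3 : pvSsum counts M ≤ total) (h4 : total < pvSsum counts (M + 1)) : L = M := by
  by_contra hne
  rcases lt_or_gt_of_ne hne with h | h
  · have := pvSsum_mono counts (show L + 1 ≤ M by omega)
    omega
  · have := pvSsum_mono counts (show M + 1 ≤ L by omega)
    omega

theorem pvMappedNodup (counts : List (String × Int)) (g : Int → Int)
    (hnd : (counts.map Prod.fst).Nodup) :
    ((counts.map (fun p => (p.1, g p.2))).map Prod.fst).Nodup := by
  simpa [List.map_map, Function.comp] using hnd

theorem pvBuild_items (counts : List (String × Int)) (g : Int → Int)
    (hnd : (counts.map Prod.fst).Nodup) :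
    ((counts.map Prod.fst).foldl
      (fun q c => q.insert c (g ((PySem.Dict.mk counts).getD c 0))) PySem.Dict.empty).items
      = counts.map (fun p => (p.1, g p.2)) := by
  have h := PySem.Dict.items_foldl_insert_fresh (counts.map Prod.fst) (fun c => c)
    (fun c => g ((PySem.Dict.mk counts).getD c 0)) PySem.Dict.empty
    (by intro a _; simp [PySem.Dict.contains_empty]) (by simpa using hnd)
  rw [h]
  have h2 := pvMapKeys counts (fun c w => (c, g w)) hnd
  simp only [PySem.Dict.empty, List.nil_append]
  exact h2

theorem pvAllCheck (counts : List (String × Int)) (M : Int)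
    (hnd : (counts.map Prod.fst).Nodup) :
    ((counts.map Prod.fst).all (fun c =>
        decide ((PySem.Dict.mk counts).getD c 0 ≤
          (PySem.Dict.mk (counts.map (fun p => (p.1, min M p.2)))).getD c 0)))
      = counts.all (fun p => decide (p.2 ≤ M)) := by
  rw [Bool.eq_iff_iff]
  simp only [List.all_eq_true, List.mem_map]
  constructor
  · intro h p hp
    have := h p.1 ⟨p, hp, rfl⟩
    rw [pvGetD_mk counts hnd (show (p.1, p.2) ∈ counts by simpa using hp),
        pvGetD_mk _ (pvMappedNodup counts (fun v => min M v) hnd)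
          (show (p.1, min M p.2) ∈ counts.map (fun p => (p.1, min M p.2)) from
            List.mem_map.mpr ⟨p, hp, rfl⟩)] at this
    simp at this ⊢
    omega
  · intro h c hc
    obtain ⟨p, hp, rfl⟩ := hc
    rw [pvGetD_mk counts hnd (show (p.1, p.2) ∈ counts by simpa using hp),
        pvGetD_mk _ (pvMappedNodup counts (fun v => min M v) hnd)
          (show (p.1, min M p.2) ∈ counts.map (fun p => (p.1, min M p.2)) from
            List.mem_map.mpr ⟨p, hp, rfl⟩)]
    have := h p hp
    simp at this ⊢
    omega

theorem pvInnerA_noprog (counts : List (String × Int))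
    (hnd : (counts.map Prod.fst).Nodup) :
    ∀ (todo done : List (String × Int)) (rem M : Int),
    ((done ++ todo).map Prod.fst).Nodup →
    (∀ p ∈ todo, p ∈ counts) →
    pvInnerA (PySem.Dict.mk counts) (todo.map Prod.fst)
        (PySem.Dict.mk (done ++ todo.map (fun p => (p.1, min M p.2)))) rem M false
      = (PySem.Dict.mk (done ++ todo.map (fun p => (p.1, min M p.2))), rem, false) := by
  intro todo
  induction todo with
  | nil => intro done rem M _ _; simp [pvInnerA]
  | cons p t ih =>
    intro done rem M hk hsub
    obtain ⟨c, v⟩ := p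
    have hnd2 : ((done ++ (c, min M v) :: t.map (fun p => (p.1, min M p.2))).map Prod.fst).Nodup := by
      simpa [List.map_map, Function.comp] using hk
    have hq : (PySem.Dict.mk (done ++ (c, min M v) :: t.map (fun p => (p.1, min M p.2)))).getD c 0
        = min M v :=
      pvGetD_mk _ hnd2 (by simp)
    have hc : (PySem.Dict.mk counts).getD c 0 = v := pvGetD_mk counts hnd (hsub _ (by simp))
    simp only [List.map_cons, pvInnerA]
    rw [hq, hc, if_neg (by omega)]
    have := ih (done ++ [(c, min M v)]) rem M (by simpa using hk)
      (fun p hp => hsub p (by simp [hp]))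
    simpa using this

theorem pvInnerA_spec (counts : List (String × Int))
    (hnd : (counts.map Prod.fst).Nodup) :
    ∀ (todo done : List (String × Int)) (rem : Int) (prog : Bool) (L : Int),
    ((done ++ todo).map Prod.fst).Nodup →
    (∀ p ∈ todo, p ∈ counts) →
    1 ≤ rem →
    pvInnerA (PySem.Dict.mk counts) (todo.map Prod.fst)
        (PySem.Dict.mk (done ++ todo.map (fun p => (p.1, min L p.2)))) rem (L + 1) prog
      = (PySem.Dict.mk (done ++ pvFill todo L rem), max (rem - pvK todo L) 0,
         prog || todo.any (fun p => decide (L < p.2))) := by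
  intro todo
  induction todo with
  | nil =>
    intro done rem prog L _ _ hrem
    simp only [List.map_nil, pvInnerA, pvFill, pvK, List.countP_nil, List.any_nil, Bool.or_false]
    refine congrArg₂ _ rfl (congrArg₂ _ ?_ rfl)
    simp
    omega
  | cons p t ih =>
    intro done rem prog L hk hsub hrem
    obtain ⟨c, v⟩ := p
    have hnd2 : ((done ++ (c, min L v) :: t.map (fun p => (p.1, min L p.2))).map Prod.fst).Nodup := by
      simpa [List.map_map, Function.comp] using hk
    have hq : (PySem.Dict.mk (done ++ (c, min L v) :: t.map (fun p => (p.1, min L p.2)))).getD c 0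
        = min L v :=
      pvGetD_mk _ hnd2 (by simp)
    have hc : (PySem.Dict.mk counts).getD c 0 = v := pvGetD_mk counts hnd (hsub _ (by simp))
    have hcdone : c ∉ done.map Prod.fst := by
      intro hmem
      have := List.disjoint_of_nodup_append (by simpa using hk)
      exact this hmem (by simp)
    have hct : c ∉ t.map Prod.fst := by
      have h2 : (c :: t.map Prod.fst).Nodup :=
        ((by simpa using hk : (done.map Prod.fst ++ c :: t.map Prod.fst).Nodup)).of_append_right
      exact (List.nodup_cons.mp h2).1
    simp only [List.map_cons, pvInnerA]
    rw [hq, hc]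
    by_cases hv : L < v
    · rw [if_pos (by omega)]
      have hcont : (PySem.Dict.mk (done ++ (c, min L v) :: t.map (fun p => (p.1, min L p.2)))).contains c = true := by
        rw [PySem.Dict.contains_iff_mem_keys]
        simp [PySem.Dict.keys]
      have hins : ((PySem.Dict.mk (done ++ (c, min L v) :: t.map (fun p => (p.1, min L p.2)))).insert
            c (min L v + 1)).items
          = done ++ (c, min L v + 1) :: t.map (fun p => (p.1, min L p.2)) := by
        rw [PySem.Dict.items_insert_of_contains _ _ hcont]
        show (done ++ (c, min L v) :: t.map (fun p => (p.1, min L p.2))).map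
            (fun p => if (p.1 == c) = true then (c, min L v + 1) else p) = _
        rw [List.map_append, List.map_cons]
        congr 1
        · have hdone : List.map (fun p => if (p.1 == c) = true then (c, min L v + 1) else p) done
              = List.map id done := by
            apply List.map_congr_left
            intro x hx
            have hxc : x.1 ≠ c := by
              intro h
              exact hcdone (by simpa [h] using List.mem_map_of_mem (f := Prod.fst) hx)
            simp [hxc]
          rw [hdone, List.map_id]
        · congr 1
          · simp
          · rw [List.map_map]
            apply List.map_congr_left
            intro x hx
            have hxc : x.1 ≠ c := by
              intro h
              exact hct (by simpa [h] using List.mem_map_of_mem (f := Prod.fst) hx)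
            simp [Function.comp, hxc]
      have hqeq : ((PySem.Dict.mk (done ++ (c, min L v) :: t.map (fun p => (p.1, min L p.2)))).insert
            c (min L v + 1))
          = PySem.Dict.mk (done ++ (c, min L v + 1) :: t.map (fun p => (p.1, min L p.2))) :=
        PySem.Dict.ext hins
      rw [hqeq]
      have hfill : pvFill ((c, v) :: t) L rem = (c, min L v + 1) :: pvFill t L (rem - 1) := by
        rw [pvFill, if_pos ⟨by omega, hv⟩]
      have hKc : pvK ((c, v) :: t) L = pvK t L + 1 := by
        simp [pvK, List.countP_cons, hv]
      by_cases hr0 : rem - 1 = 0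
      · rw [if_pos hr0]
        rw [hfill, pvFill_zero t L (by omega)]
        rw [hKc]
        simp only [Prod.mk.injEq]
        refine ⟨by first | trivial | simp, ?_, by simp [hv]⟩
        have : (0:Int) ≤ pvK t L := by simp [pvK]
        omega
      · rw [if_neg hr0]
        have hrec := ih (done ++ [(c, min L v + 1)]) (rem - 1) true L
          (by simpa using hk) (fun p hp => hsub p (by simp [hp])) (by omega)
        rw [show (done ++ [(c, min L v + 1)]) ++ t.map (fun p => (p.1, min L p.2))
              = done ++ (c, min L v + 1) :: t.map (fun p => (p.1, min L p.2)) by simp] at hrec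
        rw [hrec]
        rw [hfill, hKc]
        simp only [Prod.mk.injEq]
        refine ⟨by first | trivial | simp, by omega, by simp [hv]⟩
    · rw [if_neg (by omega)]
      have hrec := ih (done ++ [(c, min L v)]) rem prog L
        (by simpa using hk) (fun p hp => hsub p (by simp [hp])) hrem
      rw [show (done ++ [(c, min L v)]) ++ t.map (fun p => (p.1, min L p.2))
            = done ++ (c, min L v) :: t.map (fun p => (p.1, min L p.2)) by simp] at hrec
      rw [hrec]
      have hfill : pvFill ((c, v) :: t) L rem = (c, min L v) :: pvFill t L rem := by
        rw [pvFill, if_neg (by tauto)]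
      have hKc : pvK ((c, v) :: t) L = pvK t L := by
        simp [pvK, List.countP_cons, hv]
      rw [hfill, hKc]
      simp only [Prod.mk.injEq]
      refine ⟨by first | trivial | simp, by trivial, by simp [hv]⟩

theorem pvMaxc_facts (counts : List (String × Int)) (hne : counts ≠ []) :
    (∃ p ∈ counts, p.2 = (PySem.List.max? (counts.map Prod.snd) (fun v => v)).getD 0) ∧
      ∀ p ∈ counts, p.2 ≤ (PySem.List.max? (counts.map Prod.snd) (fun v => v)).getD 0 := by
  obtain ⟨m, hm⟩ : ∃ m, PySem.List.max? (counts.map Prod.snd) (fun v => v) = some m := by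
    cases h : PySem.List.max? (counts.map Prod.snd) (fun v => v) with
    | none =>
      exfalso
      have : counts.map Prod.snd = [] := by
        have h2 := (PySem.List.max?_eq_none_iff (xs := counts.map Prod.snd) (key := fun v => v))
        exact h2.mp h
      simp at this
      exact hne this
    | some m => exact ⟨m, rfl⟩
  rw [hm]
  simp only [Option.getD_some]
  constructor
  · have := PySem.List.max?_mem hm
    obtain ⟨p, hp, hpv⟩ := List.mem_map.mp this
    exact ⟨p, hp, hpv⟩
  · intro p hp
    exact PySem.List.max?_isMax hm p.2 (List.mem_map_of_mem hp)

theorem pvSat_map (counts : List (String × Int)) {A : Int} (h : ∀ p ∈ counts, p.2 ≤ A) :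
    counts.map (fun p => (p.1, min A p.2)) = counts := by
  have : counts.map (fun p => (p.1, min A p.2)) = counts.map (fun p => (p.1, p.2)) :=
    List.map_congr_left (fun p hp => by have := h p hp; congr 1; omega)
  simpa using this

theorem pvSat_ssum (counts : List (String × Int)) {A B : Int}
    (hA : ∀ p ∈ counts, p.2 ≤ A) (hB : ∀ p ∈ counts, p.2 ≤ B) :
    pvSsum counts A = pvSsum counts B := by
  rw [pvSsum_eq, pvSsum_eq]
  congr 1
  apply List.map_congr_left
  intro p hp
  have := hA p hp; have := hB p hp
  omega

theorem pvK_nonneg (counts : List (String × Int)) (L : Int) : 0 ≤ pvK counts L := by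
  simp [pvK]

theorem pvK_eq_zero_iff (counts : List (String × Int)) (L : Int) :
    pvK counts L = 0 ↔ ∀ p ∈ counts, p.2 ≤ L := by
  simp [pvK, List.countP_eq_zero]

theorem pvAny_eq_true (counts : List (String × Int)) (L : Int) :
    (counts.any (fun p => decide (L < p.2)) = true) ↔ ∃ p ∈ counts, L < p.2 := by
  simp [List.any_eq_true]

theorem pvAlt_unfold (counts : List (String × Int)) (total : Int) (hne : counts ≠ [])
    (hbase : pvSsum counts (max (PySem.Int.floordiv total (counts.length : Int)) 0) < total) :
    compute_quota_per_dir_alt counts total =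
      (if pvSsum counts ((PySem.List.max? (counts.map Prod.snd) (fun v => v)).getD 0) ≤ total then
        counts.map (fun p => (p.1, min ((PySem.List.max? (counts.map Prod.snd) (fun v => v)).getD 0) p.2))
      else
        pvFill counts
          (pvBsearch counts total
            (((PySem.List.max? (counts.map Prod.snd) (fun v => v)).getD 0
                - max (PySem.Int.floordiv total (counts.length : Int)) 0).toNat)
            (max (PySem.Int.floordiv total (counts.length : Int)) 0)
            ((PySem.List.max? (counts.map Prod.snd) (fun v => v)).getD 0))
          (total - pvSsum counts
            (pvBsearch counts total
              (((PySem.List.max? (counts.map Prod.snd) (fun v => v)).getD 0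
                  - max (PySem.Int.floordiv total (counts.length : Int)) 0).toNat)
              (max (PySem.Int.floordiv total (counts.length : Int)) 0)
              ((PySem.List.max? (counts.map Prod.snd) (fun v => v)).getD 0)))) := by
  have hD : ¬((counts.length : Int) = 0) := by
    simp only [Int.natCast_eq_zero, List.length_eq_zero_iff]
    exact hne
  simp only [compute_quota_per_dir_alt]
  rw [if_neg hD, if_neg (by omega)]

theorem pvWhileA_spec (counts : List (String × Int)) (total : Int)
    (hnd : (counts.map Prod.fst).Nodup) (hne : counts ≠ [])
    (hbase : pvSsum counts (max (PySem.Int.floordiv total (counts.length : Int)) 0) < total) :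
    ∀ (fuel : Nat) (L rem : Int), pvSsum counts L < total → rem = total - pvSsum counts L →
    2 * rem.toNat ≤ fuel →
    (pvWhileA (PySem.Dict.mk counts) (counts.map Prod.fst) fuel
        (PySem.Dict.mk (counts.map (fun p => (p.1, min L p.2)))) rem (L + 1)).items
      = compute_quota_per_dir_alt counts total := by
  -- shared notation and facts
  have halt := pvAlt_unfold counts total hne hbase
  set base := max (PySem.Int.floordiv total (counts.length : Int)) 0 with hbasedef
  set maxc := (PySem.List.max? (counts.map Prod.snd) (fun v => v)).getD 0 with hmaxcdef
  obtain ⟨⟨pm, hpmmem, hpmv⟩, hmaxub⟩ := pvMaxc_facts counts hne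
  intro fuel
  induction fuel using Nat.strong_induction_on with
  | _ fuel ih =>
    intro L rem hS hrem hfuel
    have hrem1 : 1 ≤ rem := by omega
    obtain ⟨f, rfl⟩ : ∃ f, fuel = f + 1 := ⟨fuel - 1, by omega⟩
    rw [pvWhileA, if_pos (by omega)]
    have hinner := pvInnerA_spec counts hnd counts [] rem false L (by simpa using hnd)
      (fun p hp => hp) hrem1
    simp only [List.nil_append, Bool.false_or] at hinner
    rw [hinner]
    by_cases hK : pvK counts L = 0
    · -- no category has capacity above L: loop exits via the all() break
      have hall : ∀ p ∈ counts, p.2 ≤ L := (pvK_eq_zero_iff counts L).mp hK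
      have hany : counts.any (fun p => decide (L < p.2)) = false := by
        rw [Bool.eq_false_iff]
        intro h
        obtain ⟨p, hp, hlt⟩ := (pvAny_eq_true counts L).mp h
        exact absurd (hall p hp) (by omega)
      rw [hany]
      simp only [Bool.false_eq_true, if_false]
      rw [pvFill_noelig counts L rem hall]
      rw [pvAllCheck counts L hnd]
      rw [if_pos (List.all_eq_true.mpr (fun p hp => by simpa using hall p hp))]
      rw [halt, if_pos (by rw [pvSat_ssum counts hmaxub hall]; omega)]
      rw [pvSat_map counts hall, pvSat_map counts hmaxub]
    · have hKpos : 0 < pvK counts L := lt_of_le_of_ne (pvK_nonneg counts L) (Ne.symm hK)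
      have hany : counts.any (fun p => decide (L < p.2)) = true := by
        rw [pvAny_eq_true]
        have h : 0 < List.countP (fun p => decide (L < p.2)) counts := by
          rw [pvK] at hKpos
          exact_mod_cast hKpos
        rcases List.countP_pos_iff.mp h with ⟨p, hp, hdec⟩
        exact ⟨p, hp, by simpa using hdec⟩
      rw [hany]
      simp only [if_true]
      have hmaxcL : L + 1 ≤ maxc := by
        obtain ⟨p, hp, hlt⟩ := (pvAny_eq_true counts L).mp hany
        have := hmaxub p hp
        omega
      have hsuccS : pvSsum counts (L + 1) = pvSsum counts L + pvK counts L :=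
        pvSsum_succ counts L
      by_cases hrk : rem ≤ pvK counts L
      · -- the partial pass exhausts rem: loop returns fill counts L rem
        have hrem' : max (rem - pvK counts L) 0 = 0 := by omega
        rw [hrem']
        obtain ⟨f', rfl⟩ : ∃ f', f = f' + 1 := ⟨f - 1, by omega⟩
        rw [pvWhileA, if_neg (by omega)]
        rw [halt]
        have htot1 : total ≤ pvSsum counts (L + 1) := by omega
        by_cases hsat : pvSsum counts maxc ≤ total
        · -- saturation branch coincides: maxc must be exactly L+1
          have hmaxeq : maxc = L + 1 := by
            by_contra hne2
            have hgt : L + 1 < maxc := by omega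
            have h1 : pvSsum counts maxc = pvSsum counts (maxc - 1) + pvK counts (maxc - 1) := by
              have h1 := pvSsum_succ counts (maxc - 1)
              rw [show maxc - 1 + 1 = maxc by ring] at h1
              exact h1
            have hK1 : 0 < pvK counts (maxc - 1) := by
              have hpm2 : maxc - 1 < pm.2 := by omega
              have h : 0 < List.countP (fun p => decide (maxc - 1 < p.2)) counts :=
                List.countP_pos_iff.mpr ⟨pm, hpmmem, by simpa using hpm2⟩
              rw [pvK]
              exact_mod_cast h
            have h2 : pvSsum counts (L + 1) ≤ pvSsum counts (maxc - 1) :=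
              pvSsum_mono counts (by omega)
            omega
          have htoteq : total = pvSsum counts (L + 1) :=
            le_antisymm htot1 (by rw [← hmaxeq]; exact hsat)
          rw [if_pos hsat, hmaxeq]
          exact pvFill_full counts L (r := rem) (by omega)
        · rw [if_neg hsat]
          push_neg at hsat
          have hblt : base < maxc := by
            by_contra hge
            have := pvSsum_mono counts (show maxc ≤ base by omega)
            omega
          obtain ⟨hlo1, hlo2⟩ := pvBsearch_spec counts total (maxc - base).toNat base maxc
            (by omega) hsat hblt le_rfl
          set lo := pvBsearch counts total (maxc - base).toNat base maxc with hlodef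
          by_cases htEq : total = pvSsum counts (L + 1)
          · -- full final pass: level ends exactly at L+1
            have hK1 : 0 < pvK counts (L + 1) := by
              by_cases hlt : L + 1 < maxc
              · have hpm2 : L + 1 < pm.2 := by omega
                have h : 0 < List.countP (fun p => decide (L + 1 < p.2)) counts :=
                  List.countP_pos_iff.mpr ⟨pm, hpmmem, by simpa using hpm2⟩
                rw [pvK]
                exact_mod_cast h
              · exfalso
                have := pvSsum_mono counts (show maxc ≤ L + 1 by omega)
                omega
            have hcand : pvSsum counts (L + 1) ≤ total ∧ total < pvSsum counts (L + 1 + 1) := by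
              constructor
              · omega
              · have := pvSsum_succ counts (L + 1)
                omega
            have hloeq : lo = L + 1 :=
              pvLevel_unique counts total hlo1 hlo2 hcand.1 hcand.2
            rw [hloeq]
            rw [show total - pvSsum counts (L + 1) = 0 by omega]
            rw [pvFill_zero counts (L + 1) le_rfl]
            rw [pvFill_full counts L (by omega)]
          · have hcand : pvSsum counts L ≤ total ∧ total < pvSsum counts (L + 1) := by
              constructor
              · omega
              · omega
            have hloeq : L = lo := pvLevel_unique counts total hcand.1 hcand.2 hlo1 hlo2
            rw [← hloeq, ← hrem]
      · -- full pass: everyone above L gets one unit, recurse at level L+1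
        push_neg at hrk
        rw [pvFill_full counts L (by omega)]
        have hrem'' : max (rem - pvK counts L) 0 = rem - pvK counts L := by omega
        rw [hrem'']
        obtain ⟨f', rfl⟩ : ∃ f', f = f' + 1 := ⟨f - 1, by omega⟩
        rw [pvWhileA, if_pos (by omega)]
        have hnoprog := pvInnerA_noprog counts hnd counts [] (rem - pvK counts L) (L + 1)
          (by simpa using hnd) (fun p hp => hp)
        simp only [List.nil_append] at hnoprog
        rw [hnoprog]
        simp only [Bool.false_eq_true, if_false]
        rw [pvAllCheck counts (L + 1) hnd]
        by_cases hall : ∀ p ∈ counts, p.2 ≤ L + 1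
        · rw [if_pos (List.all_eq_true.mpr (fun p hp => by simpa using hall p hp))]
          rw [halt, if_pos (by rw [pvSat_ssum counts hmaxub hall]; omega)]
          rw [pvSat_map counts hall, pvSat_map counts hmaxub]
        · rw [if_neg (by
            intro h
            exact hall (fun p hp => by simpa using List.all_eq_true.mp h p hp))]
          have := ih f' (by omega) (L + 1) (rem - pvK counts L)
            (by omega) (by omega) (by omega)
          exact this

theorem pvQ0 (counts : List (String × Int)) (base : Int)
    (hnd : (counts.map Prod.fst).Nodup) :
    ((counts.map Prod.fst).foldl
        (fun q c => q.insert c (min base ((PySem.Dict.mk counts).getD c 0))) PySem.Dict.empty)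
      = PySem.Dict.mk (counts.map (fun p => (p.1, min base p.2))) := by
  apply PySem.Dict.ext
  exact pvBuild_items counts (fun w => min base w) hnd

theorem compute_quota_per_dir_spec' :
    ∀ (counts : List (String × Int)) (total : Int), (counts.map Prod.fst).Nodup →
    compute_quota_per_dir counts total = compute_quota_per_dir_alt counts total := by
  intro counts total hnd
  by_cases hne : counts = []
  · subst hne
    rfl
  · have hkeys : (PySem.Dict.mk counts).keys = counts.map Prod.fst := rfl
    have hD : ¬(((counts.map Prod.fst).length : Int) = 0) := by
      simp only [List.length_map, Int.natCast_eq_zero, List.length_eq_zero_iff]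
      exact hne
    have hDlen : ((counts.map Prod.fst).length : Int) = (counts.length : Int) := by
      simp
    simp only [compute_quota_per_dir, hkeys]
    rw [if_neg hD, hDlen]
    rw [pvQ0 counts (max (PySem.Int.floordiv total (counts.length : Int)) 0) hnd]
    have hvals : (PySem.Dict.mk (counts.map (fun p =>
          (p.1, min (max (PySem.Int.floordiv total (counts.length : Int)) 0) p.2)))).values.sum
        = pvSsum counts (max (PySem.Int.floordiv total (counts.length : Int)) 0) := by
      simp only [PySem.Dict.values, PySem.Dict.items, List.map_map]
      rw [pvSsum_eq]
      rfl
    rw [hvals]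
    by_cases hrem : total - pvSsum counts (max (PySem.Int.floordiv total (counts.length : Int)) 0) ≤ 0
    · rw [if_pos hrem]
      simp only [compute_quota_per_dir_alt]
      rw [if_neg (by simpa using hD), if_pos (by omega)]
    · rw [if_neg hrem]
      exact pvWhileA_spec counts total hnd hne (by omega) _ _ _ (by omega) rfl (by omega)

-- ===== VERDICT (by name: the statement is the Claim_ definition above) =====
theorem compute_quota_per_dir_spec : Claim_equal_compute_quota_per_dir := by
  intro counts total _ hpre
  exact compute_quota_per_dir_spec' counts total hpre
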